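-- pv_equiv track=rewrite | github.com/alimyust/16-bit_MCPU-Assembler | src/RISC_asm/parser.py | _extract_labels
-- ===== SOURCE A (Python) =====
-- def _extract_labels(line: str) -> tuple[list[str], str]:
--     labels: list[str] = []
--     remainder = line.strip()
--
--     while ":" in remainder:
--         candidate, rest = remainder.split(":", 1)
--         label = candidate.strip()
--         if not label or any(ch.isspace() for ch in label):
--             break
--         labels.append(label)
--         remainder = rest.strip()
--
--     return labels, remainder
-- ===== SOURCE B (Python) =====
-- def _extract_labels(line: str) -> tuple[list[str], str]:
--     parts = line.strip().split(":")
--     labels: list[str] = []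
--     for i in range(len(parts) - 1):
--         label = parts[i].strip()
--         if not label or any(ch.isspace() for ch in label):
--             return labels, ":".join(parts[i:]).strip()
--         labels.append(label)
--     return labels, parts[-1].strip()
-- ===== Notes on version B (the rewrite author's own statement) =====
-- stated objective: alternative
-- what changed: A repeatedly splits the remainder at its first colon and re-strips the tail inside a while-loop; B splits the stripped line on the colon separator once up front and makes a single pass over the segments, rejoining them for the remainder only on early exit.
import Mathlib
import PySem

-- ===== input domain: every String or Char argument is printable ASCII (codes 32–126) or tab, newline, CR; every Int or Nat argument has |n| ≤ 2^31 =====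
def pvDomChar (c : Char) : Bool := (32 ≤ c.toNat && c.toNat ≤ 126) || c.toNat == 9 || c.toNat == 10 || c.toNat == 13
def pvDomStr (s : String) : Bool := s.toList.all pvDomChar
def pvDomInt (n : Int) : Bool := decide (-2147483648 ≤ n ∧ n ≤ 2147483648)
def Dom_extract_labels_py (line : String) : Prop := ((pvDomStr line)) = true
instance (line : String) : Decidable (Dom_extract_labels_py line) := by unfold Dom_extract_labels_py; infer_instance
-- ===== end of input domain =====

-- B replaces A's repeated split-first/re-strip loop by one up-front split on ':' and a single pass
-- over the resulting segments (objective: alternative decomposition, same asymptotic cost).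

-- ===== PORT A =====
-- Lemmas needed by port A's termination proof (cited in `decreasing_by`): a characterisation of
-- `remainder.split(":", 1)` and length bounds for `strip`.
lemma pvGoMax0 (c : Char) (fuel : Nat) (l cur : List Char) (acc : List (List Char)) :
    PySem.Chars.splitOnMax.go [c] fuel 0 l cur acc = acc.reverse ++ [cur.reverse ++ l] := by
  cases fuel <;> cases l <;> simp [PySem.Chars.splitOnMax.go]

lemma pvGoMax1 (c : Char) : ∀ (fuel : Nat) (l cur : List Char) (acc : List (List Char)),
    l.length < fuel →
    PySem.Chars.splitOnMax.go [c] fuel 1 l cur acc =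
      if c ∈ l then acc.reverse ++ [cur.reverse ++ l.takeWhile (· != c), (l.dropWhile (· != c)).tail]
      else acc.reverse ++ [cur.reverse ++ l] := by
  intro fuel
  induction fuel with
  | zero => intro l cur acc h; omega
  | succ f ih =>
    intro l cur acc h
    cases l with
    | nil => simp [PySem.Chars.splitOnMax.go]
    | cons a t =>
      by_cases hac : a = c
      · subst hac
        simp [PySem.Chars.splitOnMax.go, List.isPrefixOf, pvGoMax0]
      · have hpre : ([c]).isPrefixOf (a :: t) = false := by
          simp [List.isPrefixOf]; exact fun h => absurd h.symm hac
        have hne : (a != c) = true := by simp [hac]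
        simp only [PySem.Chars.splitOnMax.go, hpre, if_neg (by decide : ¬ (1 = 0)),
          if_neg (by decide : ¬ (false = true))]
        rw [ih t (a :: cur) acc (by simpa using Nat.lt_of_succ_lt_succ h)]
        by_cases hm : c ∈ t <;>
          simp [List.mem_cons, hne, hm, Ne.symm hac]

lemma pvSplitOnMax_char (c : Char) {l : List Char} (h : c ∈ l) :
    PySem.Chars.splitOnMax l [c] 1 =
      [l.takeWhile (· != c), (l.dropWhile (· != c)).tail] := by
  rw [PySem.Chars.splitOnMax]
  simp only [if_neg (by decide : ¬ ((1:Int) < 0))]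
  rw [show ((1:Int).toNat) = 1 from rfl, pvGoMax1 c (l.length+1) l [] [] (by omega)]
  simp [h]

lemma pvIsIn_char_iff (c : Char) (l : List Char) :
    PySem.Chars.isIn [c] l = true ↔ c ∈ l := by
  rw [PySem.Chars.isIn_iff_infix]
  constructor
  · intro h; exact h.sublist.subset (by simp)
  · intro h
    obtain ⟨s, t, rfl⟩ := List.append_of_mem h
    exact ⟨s, t, by simp⟩

lemma pvStrip_length_le (s : List Char) : (PySem.Chars.strip s).length ≤ s.length := by
  have h1 : (PySem.Chars.lstrip s).length ≤ s.length := List.length_dropWhile_le ..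
  have h2 : (PySem.Chars.rstrip (PySem.Chars.lstrip s)).length ≤ (PySem.Chars.lstrip s).length := by
    simpa [PySem.Chars.rstrip] using List.length_dropWhile_le (p := PySem.Chars.isspace)
      (l := (PySem.Chars.lstrip s).reverse)
  exact le_trans h2 h1

lemma pvAloop_dec {rem cand rest : List Char} (h1 : PySem.Chars.isIn [':'] rem = true)
    (h : PySem.Chars.splitOnMax rem [':'] 1 = [cand, rest]) :
    (PySem.Chars.strip rest).length < rem.length := by
  have hm : ':' ∈ rem := (pvIsIn_char_iff ':' rem).1 h1
  rw [pvSplitOnMax_char ':' hm] at h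
  have hrest : rest = (rem.dropWhile (· != ':')).tail := by
    injection h with _ h'; injection h' with h'' _; exact h''.symm
  have hdw : rem.dropWhile (· != ':') ≠ [] := by
    intro hh
    have := List.dropWhile_eq_nil_iff.1 hh ':' hm
    simp at this
  have h3 : (rem.dropWhile (· != ':')).length ≤ rem.length := List.length_dropWhile_le ..
  have h4 : (rem.dropWhile (· != ':')).tail.length < (rem.dropWhile (· != ':')).length := by
    cases hc : rem.dropWhile (· != ':') with
    | nil => exact absurd hc hdw
    | cons x xs => simp
  calc (PySem.Chars.strip rest).length ≤ rest.length := pvStrip_length_le rest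
    _ < rem.length := by rw [hrest]; omega

-- transliteration of A's while-loop: split at the first ':', strip the candidate,
-- break on an empty/whitespace label, else append and continue on the stripped rest
def pvAloop (labels : List (List Char)) (remainder : List Char) : List (List Char) × List Char :=
  if h1 : PySem.Chars.isIn [':'] remainder then
    match h : PySem.Chars.splitOnMax remainder [':'] 1 with
    | [candidate, rest] =>
      let label := PySem.Chars.strip candidate
      if label.isEmpty || label.any PySem.Chars.isspace then
        (labels, remainder)
      else
        pvAloop (labels ++ [label]) (PySem.Chars.strip rest)
    | _ => (labels, remainder)   -- unreachable: split(":", 1) on a string containing ':' has 2 parts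
  else (labels, remainder)
termination_by remainder.length
decreasing_by exact pvAloop_dec h1 h

def extract_labels_py (line : String) : List String × String :=
  let r := pvAloop [] (PySem.Chars.strip line.toList)
  (r.1.map (fun l => String.ofList l), String.ofList r.2)

-- ===== PORT B =====
-- transliteration of B: one pass over the segments of line.strip().split(':')
def pvBloop (labels : List (List Char)) (parts : List (List Char)) : List (List Char) × List Char :=
  match parts with
  | [] => (labels, [])   -- unreachable: str.split never returns an empty list
  | [last] => (labels, PySem.Chars.strip last)
  | p :: q :: r =>
    let label := PySem.Chars.strip p
    if label.isEmpty || label.any PySem.Chars.isspace then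
      (labels, PySem.Chars.strip (PySem.Chars.join [':'] (p :: q :: r)))
    else pvBloop (labels ++ [label]) (q :: r)

def extract_labels_py_alt (line : String) : List String × String :=
  let parts := PySem.Chars.splitOn (PySem.Chars.strip line.toList) [':']
  let r := pvBloop [] parts
  (r.1.map (fun l => String.ofList l), String.ofList r.2)

-- ===== PRECONDITION & SPEC =====
def Spec_extract_labels_py (line : String) (out : List String × String) : Prop := out = extract_labels_py_alt line
instance (line : String) (out : List String × String) : Decidable (Spec_extract_labels_py line out) := by unfold Spec_extract_labels_py; infer_instance

-- ===== CLAIM (what is proved, stated in full; the proofs are below) =====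
def Claim_equal_extract_labels_py : Prop := ∀ (line : String), Dom_extract_labels_py line → Spec_extract_labels_py line (extract_labels_py line)

-- ===== LEMMAS AND PROOFS =====

-- strip toolbox
lemma pvLstrip_idem (s : List Char) : PySem.Chars.lstrip (PySem.Chars.lstrip s) = PySem.Chars.lstrip s := by
  simp [PySem.Chars.lstrip, List.dropWhile_idempotent]

lemma pvLstrip_space_append {w : List Char} (hw : ∀ a ∈ w, PySem.Chars.isspace a = true) (x : List Char) :
    PySem.Chars.lstrip (w ++ x) = PySem.Chars.lstrip x := by
  have hwe : List.dropWhile PySem.Chars.isspace w = [] := List.dropWhile_eq_nil_iff.2 hw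
  simp [PySem.Chars.lstrip, List.dropWhile_append, hwe]

lemma pvRstrip_append_space {w : List Char} (hw : ∀ a ∈ w, PySem.Chars.isspace a = true) (x : List Char) :
    PySem.Chars.rstrip (x ++ w) = PySem.Chars.rstrip x := by
  have hwe : List.dropWhile PySem.Chars.isspace w.reverse = [] :=
    List.dropWhile_eq_nil_iff.2 (by simpa using hw)
  simp [PySem.Chars.rstrip, List.dropWhile_append, hwe]

lemma pvRstrip_eq_nil_iff (z : List Char) :
    PySem.Chars.rstrip z = [] ↔ ∀ a ∈ z, PySem.Chars.isspace a = true := by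
  simp [PySem.Chars.rstrip, List.dropWhile_eq_nil_iff]

lemma pvRstrip_append_of_ne_nil {z : List Char} (h : PySem.Chars.rstrip z ≠ []) (w : List Char) :
    PySem.Chars.rstrip (w ++ z) = w ++ PySem.Chars.rstrip z := by
  have h2 : List.dropWhile PySem.Chars.isspace z.reverse ≠ [] := by
    intro hh; exact h (by simp [PySem.Chars.rstrip, hh])
  have h' : (List.dropWhile PySem.Chars.isspace z.reverse).isEmpty = false := by
    cases hdw : List.dropWhile PySem.Chars.isspace z.reverse <;> simp_all
  simp [PySem.Chars.rstrip, List.dropWhile_append, h']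

lemma pvRstrip_prefix (z : List Char) : PySem.Chars.rstrip z <+: z := by
  simpa [PySem.Chars.rstrip] using (List.dropWhile_suffix (l := z.reverse) (p := PySem.Chars.isspace)).reverse

lemma pvRstrip_decomp (z : List Char) :
    ∃ w, (∀ a ∈ w, PySem.Chars.isspace a = true) ∧ z = PySem.Chars.rstrip z ++ w := by
  obtain ⟨w, hw⟩ := pvRstrip_prefix z
  refine ⟨w, ?_, hw.symm⟩
  intro a ha
  have hz : z.reverse = List.takeWhile PySem.Chars.isspace z.reverse ++ List.dropWhile PySem.Chars.isspace z.reverse :=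
    (List.takeWhile_append_dropWhile ..).symm
  have hthis : w.reverse ++ List.dropWhile PySem.Chars.isspace z.reverse = z.reverse := by
    have := congrArg List.reverse hw
    simpa [PySem.Chars.rstrip] using this
  have hw2 : w.reverse = List.takeWhile PySem.Chars.isspace z.reverse :=
    List.append_inj_left' (hthis.trans hz) rfl
  exact List.mem_takeWhile_imp (by rw [← hw2]; simpa using ha)

lemma pvLstrip_decomp (z : List Char) :
    ∃ w, (∀ a ∈ w, PySem.Chars.isspace a = true) ∧ z = w ++ PySem.Chars.lstrip z := by
  refine ⟨List.takeWhile PySem.Chars.isspace z, fun a ha => List.mem_takeWhile_imp ha, ?_⟩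
  simp [PySem.Chars.lstrip]

lemma pvLstrip_head_not_space {y' : List Char} {b : Char} {t : List Char}
    (hh : PySem.Chars.lstrip y' = b :: t) : PySem.Chars.isspace b = false := by
  have := List.head?_dropWhile_not PySem.Chars.isspace y'
  simp only [PySem.Chars.lstrip] at hh
  rw [hh] at this; simpa using this

lemma pvLstrip_rstrip_comm (y : List Char) :
    PySem.Chars.lstrip (PySem.Chars.rstrip y) = PySem.Chars.rstrip (PySem.Chars.lstrip y) := by
  obtain ⟨w, hw, hdec⟩ := pvLstrip_decomp y
  by_cases hz : PySem.Chars.lstrip y = []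
  · have hall : ∀ a ∈ y, PySem.Chars.isspace a = true := by
      intro a ha; rw [hdec] at ha
      rcases List.mem_append.1 ha with h | h
      · exact hw a h
      · rw [hz] at h; simp at h
    rw [hz, (pvRstrip_eq_nil_iff y).2 hall]
    simp [PySem.Chars.lstrip, PySem.Chars.rstrip]
  · have hrz : PySem.Chars.rstrip (PySem.Chars.lstrip y) ≠ [] := by
      rw [Ne, pvRstrip_eq_nil_iff]
      intro hall
      rcases hh : PySem.Chars.lstrip y with _ | ⟨b, t⟩
      · exact hz hh
      · have hb : PySem.Chars.isspace b = false := pvLstrip_head_not_space hh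
        have := hall b (by simp [hh])
        simp [this] at hb
    calc PySem.Chars.lstrip (PySem.Chars.rstrip y)
        = PySem.Chars.lstrip (PySem.Chars.rstrip (w ++ PySem.Chars.lstrip y)) := by rw [← hdec]
      _ = PySem.Chars.lstrip (w ++ PySem.Chars.rstrip (PySem.Chars.lstrip y)) := by
            rw [pvRstrip_append_of_ne_nil hrz]
      _ = PySem.Chars.lstrip (PySem.Chars.rstrip (PySem.Chars.lstrip y)) := pvLstrip_space_append hw _
      _ = PySem.Chars.rstrip (PySem.Chars.lstrip y) := by
            rcases hh : PySem.Chars.lstrip y with _ | ⟨b, t⟩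
            · exact absurd hh hz
            · have hb : PySem.Chars.isspace b = false := pvLstrip_head_not_space hh
              rcases hp : PySem.Chars.rstrip (b :: t) with _ | ⟨b', t'⟩
              · rw [hh] at hrz; exact absurd hp hrz
              · have hbb : b' = b := by
                  obtain ⟨u, hu⟩ := pvRstrip_prefix (b :: t)
                  rw [hp] at hu
                  exact (List.cons.injEq .. ▸ hu).1
                subst hbb
                simp [PySem.Chars.lstrip, hb]

lemma pvRstrip_idem (z : List Char) : PySem.Chars.rstrip (PySem.Chars.rstrip z) = PySem.Chars.rstrip z := by
  simp [PySem.Chars.rstrip, List.dropWhile_idempotent]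

lemma pvStrip_lstrip (p : List Char) : PySem.Chars.strip (PySem.Chars.lstrip p) = PySem.Chars.strip p := by
  simp [PySem.Chars.strip, pvLstrip_idem]

lemma pvStrip_rstrip (p : List Char) : PySem.Chars.strip (PySem.Chars.rstrip p) = PySem.Chars.strip p := by
  simp only [PySem.Chars.strip]
  rw [pvLstrip_rstrip_comm, pvRstrip_idem, ← pvLstrip_rstrip_comm, pvLstrip_rstrip_comm]

lemma pvStrip_idem (s : List Char) : PySem.Chars.strip (PySem.Chars.strip s) = PySem.Chars.strip s := by
  simp only [PySem.Chars.strip]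
  rw [pvLstrip_rstrip_comm, pvRstrip_idem, pvLstrip_idem]

lemma pvStrip_space_append {w : List Char} (hw : ∀ a ∈ w, PySem.Chars.isspace a = true) (x : List Char) :
    PySem.Chars.strip (w ++ x) = PySem.Chars.strip x := by
  simp only [PySem.Chars.strip]
  rw [pvLstrip_space_append hw]

lemma pvStrip_append_space {w : List Char} (hw : ∀ a ∈ w, PySem.Chars.isspace a = true) (x : List Char) :
    PySem.Chars.strip (x ++ w) = PySem.Chars.strip x := by
  simp only [PySem.Chars.strip]
  rw [← pvLstrip_rstrip_comm, pvRstrip_append_space hw, pvLstrip_rstrip_comm]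

-- the single-colon split, as a structural recursion
def pvSplitRec (c : Char) : List Char → List (List Char)
  | [] => [[]]
  | a :: t => if a = c then [] :: pvSplitRec c t
      else match pvSplitRec c t with
        | [] => [[a]]
        | h :: r => (a :: h) :: r

lemma pvSplitRec_ne_nil (c : Char) (l : List Char) : pvSplitRec c l ≠ [] := by
  cases l with
  | nil => simp [pvSplitRec]
  | cons a t =>
    simp only [pvSplitRec]
    split
    · simp
    · split <;> simp

lemma pvGoFull (c : Char) : ∀ (fuel : Nat) (l cur : List Char) (acc : List (List Char)),
    l.length < fuel →
    PySem.Chars.splitOn.go [c] fuel l cur acc =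
      acc.reverse ++ ((cur.reverse ++ (pvSplitRec c l).headD []) :: (pvSplitRec c l).tail) := by
  intro fuel
  induction fuel with
  | zero => intro l cur acc h; omega
  | succ f ih =>
    intro l cur acc h
    cases l with
    | nil => simp [PySem.Chars.splitOn.go, pvSplitRec]
    | cons a t =>
      by_cases hac : a = c
      · subst hac
        have hpre : ([a]).isPrefixOf (a :: t) = true := by simp [List.isPrefixOf]
        simp only [PySem.Chars.splitOn.go, hpre, if_true, List.length_cons, List.length_nil,
          Nat.zero_add, List.drop_succ_cons, List.drop_zero]
        rw [ih t [] (cur.reverse :: acc) (by simpa using Nat.lt_of_succ_lt_succ h)]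
        rcases hsr : pvSplitRec a t with _ | ⟨hh, r⟩
        · exact absurd hsr (pvSplitRec_ne_nil a t)
        · simp [pvSplitRec, hsr]
      · have hpre : ([c]).isPrefixOf (a :: t) = false := by
          simp [List.isPrefixOf]; exact fun h => absurd h.symm hac
        simp only [PySem.Chars.splitOn.go, hpre, if_neg (by decide : ¬ (false = true))]
        rw [ih t (a :: cur) acc (by simpa using Nat.lt_of_succ_lt_succ h)]
        simp only [pvSplitRec, if_neg hac]
        rcases hsr : pvSplitRec c t with _ | ⟨hh, r⟩
        · exact absurd hsr (pvSplitRec_ne_nil c t)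
        · simp

lemma pvSplitOn_char (c : Char) (l : List Char) :
    PySem.Chars.splitOn l [c] = pvSplitRec c l := by
  rw [PySem.Chars.splitOn, pvGoFull c (l.length+1) l [] [] (by omega)]
  rcases hsr : pvSplitRec c l with _ | ⟨hh, r⟩
  · exact absurd hsr (pvSplitRec_ne_nil c l)
  · simp

lemma pvSplitRec_of_not_mem {c : Char} {l : List Char} (h : c ∉ l) : pvSplitRec c l = [l] := by
  induction l with
  | nil => rfl
  | cons a t ih =>
    have hac : a ≠ c := fun hh => h (by simp [hh])
    have ht : c ∉ t := fun hh => h (by simp [hh])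
    simp [pvSplitRec, hac, ih ht]

lemma pvSplitRec_of_mem {c : Char} {l : List Char} (h : c ∈ l) :
    pvSplitRec c l = l.takeWhile (· != c) :: pvSplitRec c ((l.dropWhile (· != c)).tail) := by
  induction l with
  | nil => simp at h
  | cons a t ih =>
    by_cases hac : a = c
    · subst hac
      simp [pvSplitRec, List.takeWhile_cons, List.dropWhile_cons]
    · have hct : c ∈ t := by
        rcases List.mem_cons.1 h with h | h
        · exact absurd h.symm hac
        · exact h
      have hne : (a != c) = true := by simp [hac]
      simp only [pvSplitRec, if_neg hac]
      rcases hsr : pvSplitRec c t with _ | ⟨hh, r⟩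
      · exact absurd hsr (pvSplitRec_ne_nil c t)
      · rw [ih hct] at hsr
        injection hsr with h1 h2
        subst h1; subst h2
        simp [List.takeWhile_cons, List.dropWhile_cons, hne]

lemma pvJoin_splitRec (c : Char) (l : List Char) :
    PySem.Chars.join [c] (pvSplitRec c l) = l := by
  induction l with
  | nil => simp [pvSplitRec, PySem.Chars.join_singleton]
  | cons a t ih =>
    by_cases hac : a = c
    · subst hac
      rcases hsr : pvSplitRec a t with _ | ⟨hh, r⟩
      · exact absurd hsr (pvSplitRec_ne_nil a t)
      · rw [show pvSplitRec a (a :: t) = [] :: pvSplitRec a t from by simp [pvSplitRec],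
          hsr, PySem.Chars.join_cons_cons]
        rw [hsr] at ih
        rw [ih]; simp
    · rcases hsr : pvSplitRec c t with _ | ⟨hh, r⟩
      · exact absurd hsr (pvSplitRec_ne_nil c t)
      · rw [hsr] at ih
        cases r with
        | nil =>
          simp only [PySem.Chars.join_singleton] at ih
          simp [pvSplitRec, hac, hsr, PySem.Chars.join_singleton, ih]
        | cons y r2 =>
          rw [PySem.Chars.join_cons_cons] at ih
          simp [pvSplitRec, hac, hsr, PySem.Chars.join_cons_cons, ← List.append_assoc, ih]

def pvMapHead (f : List Char → List Char) : List (List Char) → List (List Char)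
  | [] => []
  | a :: t => f a :: t

def pvMapLast (f : List Char → List Char) : List (List Char) → List (List Char)
  | [] => []
  | [a] => [f a]
  | a :: b :: t => a :: pvMapLast f (b :: t)

lemma pvRstrip_cons (a : Char) (t : List Char) :
    PySem.Chars.rstrip (a :: t) =
      if PySem.Chars.rstrip t = [] then (if PySem.Chars.isspace a then [] else [a])
      else a :: PySem.Chars.rstrip t := by
  by_cases hrt : PySem.Chars.rstrip t = []
  · have hall : ∀ x ∈ t, PySem.Chars.isspace x = true := (pvRstrip_eq_nil_iff t).1 hrt
    rw [if_pos hrt]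
    rw [show (a :: t) = [a] ++ t from rfl, pvRstrip_append_space hall]
    by_cases ha : PySem.Chars.isspace a
    · simp [PySem.Chars.rstrip, ha]
    · simp [PySem.Chars.rstrip, ha]
  · rw [if_neg hrt, show (a :: t) = [a] ++ t from rfl, pvRstrip_append_of_ne_nil hrt]
    simp

-- pvSplitRec commutes with lstrip (lstrip hits only the first segment)
lemma pvS1 {c : Char} (hc : PySem.Chars.isspace c = false) (l : List Char) :
    pvSplitRec c (PySem.Chars.lstrip l) = pvMapHead PySem.Chars.lstrip (pvSplitRec c l) := by
  induction l with
  | nil => simp [pvSplitRec, pvMapHead, PySem.Chars.lstrip]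
  | cons a t ih =>
    by_cases ha : PySem.Chars.isspace a
    · have hac : a ≠ c := fun hh => by rw [hh, hc] at ha; exact Bool.false_ne_true ha
      have hl : PySem.Chars.lstrip (a :: t) = PySem.Chars.lstrip t := by
        simp [PySem.Chars.lstrip, ha]
      rw [hl, ih]
      rcases hsr : pvSplitRec c t with _ | ⟨hh, r⟩
      · exact absurd hsr (pvSplitRec_ne_nil c t)
      · simp only [pvSplitRec, if_neg hac, hsr, pvMapHead]
        have : PySem.Chars.lstrip (a :: hh) = PySem.Chars.lstrip hh := by
          simp [PySem.Chars.lstrip, ha]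
        rw [this]
    · have hl : PySem.Chars.lstrip (a :: t) = a :: t := by
        simp [PySem.Chars.lstrip, ha]
      rw [hl]
      by_cases hac : a = c
      · subst hac
        rcases hsr : pvSplitRec a t with _ | ⟨hh, r⟩
        · exact absurd hsr (pvSplitRec_ne_nil a t)
        · simp [pvSplitRec, hsr, pvMapHead, PySem.Chars.lstrip]
      · rcases hsr : pvSplitRec c t with _ | ⟨hh, r⟩
        · exact absurd hsr (pvSplitRec_ne_nil c t)
        · have : PySem.Chars.lstrip (a :: hh) = a :: hh := by
            simp [PySem.Chars.lstrip, ha]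
          simp [pvSplitRec, hac, hsr, pvMapHead, this]

-- pvSplitRec commutes with rstrip (rstrip hits only the last segment)
lemma pvS2 {c : Char} (hc : PySem.Chars.isspace c = false) (l : List Char) :
    pvSplitRec c (PySem.Chars.rstrip l) = pvMapLast PySem.Chars.rstrip (pvSplitRec c l) := by
  induction l with
  | nil =>
    simp [pvSplitRec, pvMapLast, PySem.Chars.rstrip]
  | cons a t ih =>
    by_cases hrt : PySem.Chars.rstrip t = []
    · have hall : ∀ x ∈ t, PySem.Chars.isspace x = true := (pvRstrip_eq_nil_iff t).1 hrt
      have hct : c ∉ t := fun hh => by have := hall c hh; simp [this] at hc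
      have hsrt : pvSplitRec c t = [t] := pvSplitRec_of_not_mem hct
      have hra : PySem.Chars.rstrip (a :: t) = if PySem.Chars.isspace a then [] else [a] := by
        rw [pvRstrip_cons, if_pos hrt]
      by_cases ha : PySem.Chars.isspace a
      · have hac : a ≠ c := fun hh => by rw [hh, hc] at ha; exact Bool.false_ne_true ha
        rw [hra, if_pos ha]
        have h2 : pvSplitRec c (a :: t) = [a :: t] := pvSplitRec_of_not_mem (by
          intro hm
          rcases List.mem_cons.1 hm with h | h
          · exact hac h.symm
          · exact hct h)
        rw [h2]
        show [[]] = [PySem.Chars.rstrip (a :: t)]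
        rw [hra, if_pos ha]
      · rw [hra, if_neg ha]
        by_cases hac : a = c
        · subst hac
          rw [show pvSplitRec a [a] = [[], []] from by simp [pvSplitRec],
            show pvSplitRec a (a :: t) = [] :: pvSplitRec a t from by simp [pvSplitRec], hsrt]
          show _ = [[], PySem.Chars.rstrip t]
          rw [hrt]
        · have h1 : pvSplitRec c [a] = [[a]] := pvSplitRec_of_not_mem (show c ∉ [a] by
            intro hm; exact hac (List.mem_singleton.1 hm).symm)
          have h2 : pvSplitRec c (a :: t) = [a :: t] := pvSplitRec_of_not_mem (by
            intro hm
            rcases List.mem_cons.1 hm with h | h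
            · exact hac h.symm
            · exact hct h)
          rw [h1, h2]
          show _ = [PySem.Chars.rstrip (a :: t)]
          rw [hra, if_neg ha]
    · rw [pvRstrip_cons, if_neg hrt]
      by_cases hac : a = c
      · subst hac
        rw [show pvSplitRec a (a :: PySem.Chars.rstrip t) = [] :: pvSplitRec a (PySem.Chars.rstrip t)
          from by simp [pvSplitRec], ih,
          show pvSplitRec a (a :: t) = [] :: pvSplitRec a t from by simp [pvSplitRec]]
        rcases hsr : pvSplitRec a t with _ | ⟨hh, r⟩
        · exact absurd hsr (pvSplitRec_ne_nil a t)
        · simp [pvMapLast]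
      · simp only [pvSplitRec, if_neg hac]
        rw [ih]
        rcases hsr : pvSplitRec c t with _ | ⟨hh, r⟩
        · exact absurd hsr (pvSplitRec_ne_nil c t)
        · cases r with
          | nil =>
            have hht : hh = t := by
              have h2 : c ∉ t := by
                intro hmem
                rw [pvSplitRec_of_mem hmem] at hsr
                injection hsr with _ h3
                exact pvSplitRec_ne_nil c _ h3
              rw [pvSplitRec_of_not_mem h2] at hsr
              injection hsr with h4 _
              exact h4.symm
            subst hht
            simp only [pvMapLast]
            rw [pvRstrip_cons, if_neg hrt]
          | cons y r2 =>
            simp [pvMapLast, hsr]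

lemma pvChain (c : Char) (hc : PySem.Chars.isspace c = false) (l : List Char) :
    pvSplitRec c (PySem.Chars.strip l) =
      pvMapLast PySem.Chars.rstrip (pvMapHead PySem.Chars.lstrip (pvSplitRec c l)) := by
  simp only [PySem.Chars.strip]
  rw [pvS2 hc, pvS1 hc]

lemma pvMapLast_ne_nil (f : List Char → List Char) {ps : List (List Char)} (h : ps ≠ []) :
    pvMapLast f ps ≠ [] := by
  cases ps with
  | nil => exact absurd rfl h
  | cons a t => cases t <;> simp [pvMapLast]

-- pvBloop ignores leading whitespace of the first segment
lemma pvI1 (labels : List (List Char)) (ps : List (List Char)) :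
    pvBloop labels (pvMapHead PySem.Chars.lstrip ps) = pvBloop labels ps := by
  rcases ps with _ | ⟨p, _ | ⟨q, r⟩⟩
  · rfl
  · simp [pvMapHead, pvBloop, pvStrip_lstrip]
  · obtain ⟨w, hw, hdec⟩ := pvLstrip_decomp p
    simp only [pvMapHead, pvBloop, pvStrip_lstrip]
    have hjoin : PySem.Chars.strip (PySem.Chars.join [':'] (PySem.Chars.lstrip p :: q :: r)) =
        PySem.Chars.strip (PySem.Chars.join [':'] (p :: q :: r)) := by
      rw [PySem.Chars.join_cons_cons, PySem.Chars.join_cons_cons]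
      conv_rhs => rw [hdec]
      rw [List.append_assoc w (PySem.Chars.lstrip p) [':'], List.append_assoc w,
        pvStrip_space_append hw]
    rw [hjoin]

lemma pvJoin_mapLast_rstrip (c : Char) : ∀ (ps : List (List Char)), ps ≠ [] →
    ∃ w, (∀ a ∈ w, PySem.Chars.isspace a = true) ∧
      PySem.Chars.join [c] ps = PySem.Chars.join [c] (pvMapLast PySem.Chars.rstrip ps) ++ w := by
  intro ps
  induction ps with
  | nil => intro h; exact absurd rfl h
  | cons x r ih =>
    intro _
    cases r with
    | nil =>
      obtain ⟨w, hw, hdec⟩ := pvRstrip_decomp x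
      exact ⟨w, hw, by simp [pvMapLast, PySem.Chars.join_singleton, ← hdec]⟩
    | cons y r2 =>
      obtain ⟨w, hw, hjoin⟩ := ih (by simp)
      refine ⟨w, hw, ?_⟩
      rw [show pvMapLast PySem.Chars.rstrip (x :: y :: r2) = x :: pvMapLast PySem.Chars.rstrip (y :: r2)
        from rfl]
      obtain ⟨y2, r3, hml⟩ : ∃ y2 r3, pvMapLast PySem.Chars.rstrip (y :: r2) = y2 :: r3 := by
        rcases hmm : pvMapLast PySem.Chars.rstrip (y :: r2) with _ | ⟨y2, r3⟩
        · exact absurd hmm (pvMapLast_ne_nil _ (by simp))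
        · exact ⟨y2, r3, rfl⟩
      rw [hml, PySem.Chars.join_cons_cons, PySem.Chars.join_cons_cons, ← hml, hjoin]
      simp [List.append_assoc]

-- pvBloop ignores trailing whitespace of the last segment
lemma pvI2 (labels : List (List Char)) (ps : List (List Char)) :
    pvBloop labels (pvMapLast PySem.Chars.rstrip ps) = pvBloop labels ps := by
  induction ps generalizing labels with
  | nil => rfl
  | cons p r ih =>
    cases r with
    | nil => simp [pvMapLast, pvBloop, pvStrip_rstrip]
    | cons q r2 =>
      obtain ⟨q2, r3, hml⟩ : ∃ q2 r3, pvMapLast PySem.Chars.rstrip (q :: r2) = q2 :: r3 := by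
        rcases hmm : pvMapLast PySem.Chars.rstrip (q :: r2) with _ | ⟨q2, r3⟩
        · exact absurd hmm (pvMapLast_ne_nil _ (by simp))
        · exact ⟨q2, r3, rfl⟩
      rw [show pvMapLast PySem.Chars.rstrip (p :: q :: r2) = p :: pvMapLast PySem.Chars.rstrip (q :: r2)
        from rfl, hml]
      simp only [pvBloop]
      obtain ⟨w, hw, hjoin⟩ := pvJoin_mapLast_rstrip ':' (q :: r2) (by simp)
      have hj2 : PySem.Chars.strip (PySem.Chars.join [':'] (p :: q2 :: r3)) =
          PySem.Chars.strip (PySem.Chars.join [':'] (p :: q :: r2)) := by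
        rw [PySem.Chars.join_cons_cons, PySem.Chars.join_cons_cons, ← hml, hjoin,
          ← List.append_assoc]
        exact (pvStrip_append_space hw _).symm
      rw [hj2, ← hml, ih]


lemma pvBloop_splitRec_strip (L : List (List Char)) (rt : List Char) :
    pvBloop L (pvSplitRec ':' (PySem.Chars.strip rt)) = pvBloop L (pvSplitRec ':' rt) := by
  rw [pvChain ':' (by decide) rt, pvI2, pvI1]

lemma pvMain : ∀ (n : Nat) (rem : List Char) (labels : List (List Char)), rem.length ≤ n →
    pvBloop labels (pvSplitRec ':' (PySem.Chars.strip rem)) =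
      pvAloop labels (PySem.Chars.strip rem) := by
  intro n
  induction n with
  | zero =>
    intro rem labels hlen
    have : rem = [] := List.length_eq_zero_iff.1 (Nat.le_zero.1 hlen)
    subst this
    rw [pvAloop]
    simp [pvSplitRec, pvBloop, PySem.Chars.strip, PySem.Chars.lstrip, PySem.Chars.rstrip,
      show PySem.Chars.isIn [':'] ([] : List Char) = false from rfl]
  | succ n ih =>
    intro rem labels hlen
    have hss : PySem.Chars.strip (PySem.Chars.strip rem) = PySem.Chars.strip rem := pvStrip_idem rem
    by_cases hm : ':' ∈ PySem.Chars.strip rem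
    · -- at least one colon in the stripped line
      have hin : PySem.Chars.isIn [':'] (PySem.Chars.strip rem) = true := (pvIsIn_char_iff ':' _).2 hm
      have hsplit := pvSplitOnMax_char ':' hm
      have hsr := pvSplitRec_of_mem hm
      obtain ⟨hd, r, hrt⟩ : ∃ hd r,
          pvSplitRec ':' (((PySem.Chars.strip rem).dropWhile (· != ':')).tail) = hd :: r := by
        rcases hx : pvSplitRec ':' (((PySem.Chars.strip rem).dropWhile (· != ':')).tail) with _ | ⟨hd, r⟩
        · exact absurd hx (pvSplitRec_ne_nil _ _)
        · exact ⟨hd, r, rfl⟩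
      rw [hsr, hrt]
      rw [pvAloop]
      rw [dif_pos hin]
      split
      next candidate rest heq =>
        rw [hsplit] at heq
        injection heq with e1 e2
        injection e2 with e2 _
        subst e1; subst e2
        simp only [pvBloop]
        by_cases hbad : ((PySem.Chars.strip ((PySem.Chars.strip rem).takeWhile (· != ':'))).isEmpty ||
            (PySem.Chars.strip ((PySem.Chars.strip rem).takeWhile (· != ':'))).any PySem.Chars.isspace) = true
      
        · rw [if_pos hbad, if_pos hbad]
          rw [← hrt, ← hsr, pvJoin_splitRec, hss]
        · rw [if_neg (by simpa using hbad), if_neg (by simpa using hbad)]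
          rw [← hrt, ← pvBloop_splitRec_strip]
          refine ih _ _ ?_
          -- the tail after the first colon is strictly shorter
          have h1 : (PySem.Chars.strip rem).length ≤ rem.length := pvStrip_length_le rem
          have h2 : ((PySem.Chars.strip rem).dropWhile (· != ':')).length ≤ (PySem.Chars.strip rem).length :=
            List.length_dropWhile_le ..
          have h3 : (PySem.Chars.strip rem).dropWhile (· != ':') ≠ [] := by
            intro hh
            have := List.dropWhile_eq_nil_iff.1 hh ':' hm
            simp at this
          have h4 : (((PySem.Chars.strip rem).dropWhile (· != ':')).tail).length <
              ((PySem.Chars.strip rem).dropWhile (· != ':')).length := by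
            cases hc : (PySem.Chars.strip rem).dropWhile (· != ':') with
            | nil => exact absurd hc h3
            | cons x xs => simp
          omega
      next hno =>
        exact absurd hsplit (hno _ _)
    · -- no colon: A returns at once, B strips the single segment
      have hin : PySem.Chars.isIn [':'] (PySem.Chars.strip rem) = false := by
        rcases hii : PySem.Chars.isIn [':'] (PySem.Chars.strip rem)
        · rfl
        · exact absurd ((pvIsIn_char_iff ':' _).1 hii) hm
      rw [pvSplitRec_of_not_mem hm, pvAloop, dif_neg (by simp [hin])]
      show (labels, PySem.Chars.strip (PySem.Chars.strip rem)) = _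
      rw [hss]

-- ===== VERDICT (by name: the statement is the Claim_ definition above) =====
theorem extract_labels_py_spec : Claim_equal_extract_labels_py := by
  intro line _
  unfold Spec_extract_labels_py extract_labels_py extract_labels_py_alt
  simp only [pvSplitOn_char, pvMain line.toList.length line.toList [] le_rfl]
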